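-- pv_equiv track=rewrite | github.com/Satyam42291/TradeHelp | TradeHelp_Trading_made_easy/app.py | find_price_column
-- ===== SOURCE A (Python) =====
-- def find_price_column(cols, open_or_close="close"):
--     """
--     Find a best-match column for open/close among provided column names.
--     open_or_close: 'close' or 'open'
--     """
--     keywords = {
--         "close": ["adj close", "adj_close", "close", "close_"],
--         "open": ["open", "open_"],
--     }
--     lc = [str(c).lower() for c in cols]
--     for kw in keywords.get(open_or_close, []):
--         for i, col in enumerate(lc):
--             if kw in col:
--                 return cols[i]
--     # fallback: any containing the word
--     for i, col in enumerate(lc):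
--         if open_or_close in col:
--             return cols[i]
--     return None
-- ===== SOURCE B (Python) =====
-- def find_price_column(cols, open_or_close="close"):
--     """
--     Find a best-match column for open/close among provided column names.
--     open_or_close: 'close' or 'open'
--     """
--     keywords = {
--         "close": ["adj close", "adj_close", "close", "close_"],
--         "open": ["open", "open_"],
--     }
--     search = keywords.get(open_or_close, []) + [open_or_close]
--     best = None  # (rank of first matching search word, original column)
--     for c in cols:
--         col = str(c).lower()
--         for r, kw in enumerate(search):
--             if kw in col:
--                 if best is None or r < best[0]:
--                     best = (r, c)
--                 break
--     return None if best is None else best[1]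
-- ===== Notes on version B (the rewrite author's own statement) =====
-- stated objective: alternative
-- what changed: Inverted the loop nesting: instead of scanning all columns once per keyword (keyword-outer, with a separate fallback pass), B builds the priority list once (keywords plus the fallback word) and makes a single column-outer pass, keeping the column whose first-matching-keyword rank is smallest (earliest column wins ties).
import Mathlib
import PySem

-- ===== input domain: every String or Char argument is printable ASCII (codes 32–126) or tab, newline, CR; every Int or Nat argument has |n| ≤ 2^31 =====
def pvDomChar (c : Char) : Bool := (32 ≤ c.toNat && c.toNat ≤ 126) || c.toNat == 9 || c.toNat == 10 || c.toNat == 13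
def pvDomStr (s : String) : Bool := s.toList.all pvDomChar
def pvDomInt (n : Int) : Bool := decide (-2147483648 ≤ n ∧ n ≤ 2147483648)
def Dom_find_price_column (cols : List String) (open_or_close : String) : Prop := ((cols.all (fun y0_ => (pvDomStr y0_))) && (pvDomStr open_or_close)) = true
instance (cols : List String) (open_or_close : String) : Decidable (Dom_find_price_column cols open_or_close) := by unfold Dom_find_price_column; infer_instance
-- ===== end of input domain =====

-- B replaces A's keyword-outer scan (plus a separate fallback pass) by one column-outer pass over
-- a single priority list, keeping the column with the smallest (keyword-rank, position); objective: alternative.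


-- ===== PORT A =====
-- the literal dict 'keywords' (same in both Pythons)
def pvKeywords : PySem.Dict String (List String) :=
  PySem.Dict.mk [("close", ["adj close", "adj_close", "close", "close_"]),
                 ("open", ["open", "open_"])]

-- inner loop 'for i, col in enumerate(lc): if kw in col: return cols[i]';
-- cols[i] is carried alongside lc[i] by pairing the two lists (same index).
def pvScanCols (pairs : List (String × String)) (kw : String) : Option String :=
  match pairs with
  | [] => none
  | (c, l) :: rest => if PySem.Str.isIn kw l then some c else pvScanCols rest kw

-- outer loop 'for kw in keywords.get(open_or_close, [])' with early return
def pvScanKws (pairs : List (String × String)) (kws : List String) : Option String :=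
  match kws with
  | [] => none
  | kw :: rest =>
    match pvScanCols pairs kw with
    | some c => some c
    | none => pvScanKws pairs rest

-- str(c) is the identity on a String argument; lc = [str(c).lower() for c in cols]
def find_price_column (cols : List String) (open_or_close : String) : Option String :=
  let lc := cols.map (fun c => PySem.Str.lower c)
  let pairs := cols.zip lc
  match pvScanKws pairs (pvKeywords.getD open_or_close []) with
  | some c => some c
  | none => pvScanCols pairs open_or_close   -- fallback loop, then 'return None'

-- ===== PORT B =====
-- body of B's single loop over the columns: r = first index in search whose word is in col (none if no match),
-- then 'if r is not None and (best is None or r < best[0]): best = (r, c)'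
def pvStep (search : List String) (best : Option (Nat × String)) (c : String) : Option (Nat × String) :=
  match search.findIdx? (fun kw => PySem.Str.isIn kw (PySem.Str.lower c)) with
  | none => best
  | some r =>
    match best with
    | none => some (r, c)
    | some (br, bc) => if r < br then some (r, c) else some (br, bc)

def find_price_column_alt (cols : List String) (open_or_close : String) : Option String :=
  let search := pvKeywords.getD open_or_close [] ++ [open_or_close]
  match cols.foldl (pvStep search) none with
  | none => none
  | some (_, c) => some c

-- ===== PRECONDITION & SPEC =====
def Spec_find_price_column (cols : List String) (open_or_close : String) (out : Option String) : Prop := out = find_price_column_alt cols open_or_close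
instance (cols : List String) (open_or_close : String) (out : Option String) : Decidable (Spec_find_price_column cols open_or_close out) := by unfold Spec_find_price_column; infer_instance

-- ===== CLAIM (what is proved, stated in full; the proofs are below) =====
def Claim_equal_find_price_column : Prop := ∀ (cols : List String) (open_or_close : String), Dom_find_price_column cols open_or_close → Spec_find_price_column cols open_or_close (find_price_column cols open_or_close)

-- ===== LEMMAS AND PROOFS =====

-- rank of a (lowered) column name against the priority list
def pvRank (s : List String) (l : String) : Option Nat :=
  s.findIdx? (fun kw => PySem.Str.isIn kw l)

-- left-biased minimum on (rank, column)
def pvMerge : Option (Nat × String) → Option (Nat × String) → Option (Nat × String)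
  | none, y => y
  | x, none => x
  | some (r, c), some (r', c') => if r' < r then some (r', c') else some (r, c)

-- A's nested scan, instrumented with the rank of the winning keyword
def pvR (pairs : List (String × String)) (kws : List String) : Option (Nat × String) :=
  match kws with
  | [] => none
  | kw :: rest =>
    match pvScanCols pairs kw with
    | some c => some (0, c)
    | none => (pvR pairs rest).map (fun p => (p.1 + 1, p.2))

theorem pvScanKws_eq_pvR (pairs : List (String × String)) (kws : List String) :
    pvScanKws pairs kws = (pvR pairs kws).map Prod.snd := by
  induction kws with
  | nil => rfl
  | cons kw rest ih =>
    simp only [pvScanKws, pvR]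
    cases pvScanCols pairs kw with
    | some c => rfl
    | none => simp [ih, Option.map_map]; rfl

theorem pvMerge_none_right (x : Option (Nat × String)) : pvMerge x none = x := by
  cases x <;> rfl

theorem pvMerge_map_shift (x y : Option (Nat × String)) :
    pvMerge (x.map (fun p => (p.1 + 1, p.2))) (y.map (fun p => (p.1 + 1, p.2)))
      = (pvMerge x y).map (fun p => (p.1 + 1, p.2)) := by
  rcases x with _ | ⟨r, c⟩ <;> rcases y with _ | ⟨r', c'⟩
  · rfl
  · rfl
  · rfl
  · by_cases h : r' < r <;> simp [pvMerge, h]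

theorem pvMerge_assoc (a b c : Option (Nat × String)) :
    pvMerge (pvMerge a b) c = pvMerge a (pvMerge b c) := by
  rcases a with _ | ⟨r1, c1⟩
  · rfl
  rcases b with _ | ⟨r2, c2⟩
  · rfl
  rcases c with _ | ⟨r3, c3⟩
  · rw [pvMerge_none_right, pvMerge_none_right]
  by_cases h12 : r2 < r1 <;> by_cases h23 : r3 < r2 <;> by_cases h13 : r3 < r1 <;>
    simp [pvMerge, h12, h23, h13] <;> omega

-- core: prepending one column to A's scan merges its (rank, column) into the result
theorem pvRank_cons (kw : String) (rest : List String) (l : String) :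
    pvRank (kw :: rest) l
      = if PySem.Str.isIn kw l then some 0 else (pvRank rest l).map (· + 1) := by
  simp [pvRank, List.findIdx?_cons]

-- core: prepending one column to A's scan merges its (rank, column) into the result
theorem pvR_cons (c l : String) (ps : List (String × String)) (kws : List String) :
    pvR ((c, l) :: ps) kws
      = pvMerge ((pvRank kws l).map (fun r => (r, c))) (pvR ps kws) := by
  induction kws with
  | nil => rfl
  | cons kw rest ih =>
    rw [pvRank_cons]
    by_cases h : PySem.Str.isIn kw l = true
    · have h2 : PySem.Chars.isIn kw.toList l.toList = true := by simpa using h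
      have hL : pvR ((c, l) :: ps) (kw :: rest) = some (0, c) := by
        simp [pvR, pvScanCols, h2]
      rw [hL, if_pos h]
      rcases pvR ps (kw :: rest) with _ | ⟨r', c'⟩
      · rfl
      · simp [pvMerge]
    · have h2 : PySem.Chars.isIn kw.toList l.toList = false := by simpa using h
      rw [if_neg h]
      cases hps : pvScanCols ps kw with
      | none =>
        have hL : pvR ((c, l) :: ps) (kw :: rest)
            = (pvR ((c, l) :: ps) rest).map (fun p => (p.1 + 1, p.2)) := by
          simp [pvR, pvScanCols, h2, hps]
        have hR : pvR ps (kw :: rest) = (pvR ps rest).map (fun p => (p.1 + 1, p.2)) := by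
          simp [pvR, hps]
        rw [hL, hR, ih, ← pvMerge_map_shift, Option.map_map, Option.map_map]
        rfl
      | some c0 =>
        have hL : pvR ((c, l) :: ps) (kw :: rest) = some (0, c0) := by
          simp [pvR, pvScanCols, h2, hps]
        have hR : pvR ps (kw :: rest) = some (0, c0) := by simp [pvR, hps]
        rw [hL, hR]
        rcases pvRank rest l with _ | r
        · rfl
        · simp [pvMerge]

theorem pvR_nil (kws : List String) : pvR [] kws = none := by
  induction kws with
  | nil => rfl
  | cons kw rest ih => simp [pvR, pvScanCols, ih]

-- B's loop body is a merge with the column's (rank, column)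
theorem pvStep_eq_merge (s : List String) (b : Option (Nat × String)) (c : String) :
    pvStep s b c = pvMerge b ((pvRank s (PySem.Str.lower c)).map (fun r => (r, c))) := by
  simp only [pvStep, pvRank]
  rcases s.findIdx? (fun kw => PySem.Str.isIn kw (PySem.Str.lower c)) with _ | r
  · cases b <;> rfl
  · rcases b with _ | ⟨br, bc⟩ <;> simp [pvMerge]

theorem foldl_pvStep_eq (s : List String) (cols : List String) (b : Option (Nat × String)) :
    cols.foldl (pvStep s) b = pvMerge b (cols.foldl (pvStep s) none) := by
  induction cols generalizing b with
  | nil => simp [List.foldl, pvMerge_none_right]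
  | cons c cols ih =>
    simp only [List.foldl]
    rw [ih, ih (pvStep s none c), pvStep_eq_merge, pvStep_eq_merge, pvMerge_assoc]
    rfl

-- B's fold computes exactly A's instrumented scan over the paired columns
theorem foldl_pvStep_eq_pvR (s : List String) (cols : List String) :
    cols.foldl (pvStep s) none = pvR (cols.map (fun c => (c, PySem.Str.lower c))) s := by
  induction cols with
  | nil => simp [List.foldl, pvR_nil]
  | cons c cols ih =>
    simp only [List.foldl, List.map]
    rw [foldl_pvStep_eq, ih, pvR_cons, pvStep_eq_merge]
    rfl

theorem zip_map_lower (cols : List String) :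
    cols.zip (cols.map (fun c => PySem.Str.lower c))
      = cols.map (fun c => (c, PySem.Str.lower c)) := by
  induction cols with
  | nil => rfl
  | cons c cols ih => simp [List.zip_cons_cons, ih]

-- A's keyword loop followed by the fallback scan is one scan over the appended list
theorem pvScanKws_append_singleton (pairs : List (String × String)) (kws : List String) (t : String) :
    pvScanKws pairs (kws ++ [t])
      = (match pvScanKws pairs kws with
         | some c => some c
         | none => pvScanCols pairs t) := by
  induction kws with
  | nil => simp only [List.nil_append, pvScanKws]; cases pvScanCols pairs t <;> rfl
  | cons kw rest ih =>
    simp only [List.cons_append, pvScanKws]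
    cases pvScanCols pairs kw <;> simp [ih]

-- ===== VERDICT (by name: the statement is the Claim_ definition above) =====
theorem find_price_column_spec : Claim_equal_find_price_column := by
  intro cols ooc _
  unfold Spec_find_price_column
  simp only [find_price_column, find_price_column_alt]
  rw [zip_map_lower, ← pvScanKws_append_singleton, pvScanKws_eq_pvR, foldl_pvStep_eq_pvR]
  cases hx : pvR (cols.map (fun c => (c, PySem.Str.lower c))) (pvKeywords.getD ooc [] ++ [ooc]) with
  | none => simp
  | some p => simp
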